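-- pv_equiv track=rewrite | github.com/rubenhortas/hackthebox | triangles/decoder.py | _uncap
-- ===== SOURCE A (Python) =====
-- def _uncap(num: int) -> list:
--     """
--     Undoes the cap() function operations.
--     """
--     result = []
--
--     for i in range(-7, 8):  # [-7,7]
--         p = num + i
--
--         if p <= 0:
--             if 0 not in result:
--                 result.append(0)
--         elif p >= 99:
--             if 99 not in result:
--                 result.append(99)
--         else:
--             result.append(p)
--
--     return result
-- ===== SOURCE B (Python) =====
-- def _uncap(num: int) -> list:
--     result = []
--     if num - 7 <= 0:
--         result.append(0)
--     result.extend(range(max(1, num - 7), min(98, num + 7) + 1))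
--     if num + 7 >= 99:
--         result.append(99)
--     return result
-- ===== Notes on version B (the rewrite author's own statement) =====
-- stated objective: simpler
-- what changed: B computes the answer directly from boundary conditions (optional leading 0, one unclamped range, optional trailing 99) instead of looping over every offset in [-7, 7] with clamping and membership-based dedup.
import Mathlib
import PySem

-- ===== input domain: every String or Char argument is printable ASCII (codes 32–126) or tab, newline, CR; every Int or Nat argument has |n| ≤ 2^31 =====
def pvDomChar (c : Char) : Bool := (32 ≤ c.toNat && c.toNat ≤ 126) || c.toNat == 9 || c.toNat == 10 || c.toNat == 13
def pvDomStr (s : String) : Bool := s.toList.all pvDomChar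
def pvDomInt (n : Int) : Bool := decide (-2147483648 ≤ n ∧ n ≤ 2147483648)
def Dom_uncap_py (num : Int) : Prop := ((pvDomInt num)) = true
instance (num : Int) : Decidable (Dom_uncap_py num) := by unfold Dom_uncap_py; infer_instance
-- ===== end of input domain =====

-- B replaces A's clamp-and-dedup loop over the 15 offsets by a direct construction:
-- optional leading 0, the unclamped middle range, optional trailing 99 (objective: simpler).

-- ===== PORT A =====
-- loop body of A's for-loop
def uncapStep (num : Int) (result : List Int) (i : Int) : List Int :=
  let p := num + i
  if p ≤ 0 then
    (if 0 ∈ result then result else result ++ [0])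
  else if p ≥ 99 then
    (if 99 ∈ result then result else result ++ [99])
  else
    result ++ [p]

def uncap_py (num : Int) : List Int :=
  (PySem.List.pyRange (-7) 8 1).foldl (uncapStep num) []

-- ===== PORT B =====
def uncap_py_alt (num : Int) : List Int :=
  (if num - 7 ≤ 0 then [0] else []) ++
  PySem.List.pyRange (max 1 (num - 7)) (min 98 (num + 7) + 1) 1 ++
  (if num + 7 ≥ 99 then [99] else [])

-- ===== PRECONDITION & SPEC =====
def Spec_uncap_py (num : Int) (out : List Int) : Prop := out = uncap_py_alt num
instance (num : Int) (out : List Int) : Decidable (Spec_uncap_py num out) := by unfold Spec_uncap_py; infer_instance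

-- ===== CLAIM (what is proved, stated in full; the proofs are below) =====
def Claim_equal_uncap_py : Prop := ∀ (num : Int), Dom_uncap_py num → Spec_uncap_py num (uncap_py num)

-- ===== LEMMAS AND PROOFS =====

-- once the result is [0] and every remaining p is ≤ 0, the loop leaves it unchanged
theorem foldl_const0 (num : Int) (l : List Int) (h : ∀ i ∈ l, num + i ≤ 0) :
    l.foldl (uncapStep num) [0] = [0] := by
  induction l with
  | nil => rfl
  | cons a t ih =>
      rw [List.foldl_cons]
      have ha : num + a ≤ 0 := h a (by simp)
      have : uncapStep num [0] a = [0] := by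
        simp only [uncapStep]; rw [if_pos ha]; simp
      rw [this]
      exact ih (fun i hi => h i (by simp [hi]))

-- once the result is [99] and every remaining p is ≥ 99, the loop leaves it unchanged
theorem foldl_const99 (num : Int) (l : List Int) (h : ∀ i ∈ l, num + i ≥ 99) :
    l.foldl (uncapStep num) [99] = [99] := by
  induction l with
  | nil => rfl
  | cons a t ih =>
      rw [List.foldl_cons]
      have ha : num + a ≥ 99 := h a (by simp)
      have : uncapStep num [99] a = [99] := by
        simp only [uncapStep]; rw [if_neg (by omega), if_pos ha]; simp
      rw [this]
      exact ih (fun i hi => h i (by simp [hi]))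

-- when no clamp fires, the loop just appends num + i for each offset
theorem foldl_mid (num : Int) (l : List Int) (h : ∀ i ∈ l, 0 < num + i ∧ num + i < 99) :
    ∀ res : List Int, l.foldl (uncapStep num) res = res ++ l.map (fun i => num + i) := by
  induction l with
  | nil => intro res; simp
  | cons a t ih =>
      intro res
      rw [List.foldl_cons]
      have ha := h a (by simp)
      have hstep : uncapStep num res a = res ++ [num + a] := by
        simp only [uncapStep]; rw [if_neg (by omega), if_neg (by omega)]
      rw [hstep, ih (fun i hi => h i (by simp [hi]))]
      simp

theorem uncap_low (num : Int) (h : num ≤ -8) :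
    uncap_py num = uncap_py_alt num := by
  unfold uncap_py uncap_py_alt
  rw [PySem.List.pyRange_one_cons (by norm_num), List.foldl_cons]
  have h1 : uncapStep num [] (-7) = [0] := by
    simp only [uncapStep]; rw [if_pos (by omega)]; simp
  rw [h1, foldl_const0 num _ (fun i hi => by
    rw [PySem.List.mem_pyRange_one] at hi; omega)]
  rw [if_pos (by omega : num - 7 ≤ 0), if_neg (by omega : ¬ (num + 7 ≥ 99)),
      PySem.List.pyRange_one_eq_nil (by omega)]
  simp

theorem uncap_high (num : Int) (h : 107 ≤ num) :
    uncap_py num = uncap_py_alt num := by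
  unfold uncap_py uncap_py_alt
  rw [PySem.List.pyRange_one_cons (by norm_num), List.foldl_cons]
  have h1 : uncapStep num [] (-7) = [99] := by
    simp only [uncapStep]; rw [if_neg (by omega), if_pos (by omega)]; simp
  rw [h1, foldl_const99 num _ (fun i hi => by
    rw [PySem.List.mem_pyRange_one] at hi; omega)]
  rw [if_neg (by omega : ¬ (num - 7 ≤ 0)), if_pos (by omega : num + 7 ≥ 99),
      PySem.List.pyRange_one_eq_nil (by omega)]
  simp

theorem uncap_mid (num : Int) (h1 : 8 ≤ num) (h2 : num ≤ 91) :
    uncap_py num = uncap_py_alt num := by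
  unfold uncap_py uncap_py_alt
  rw [foldl_mid num _ (fun i hi => by
    rw [PySem.List.mem_pyRange_one] at hi; omega)]
  rw [if_neg (by omega : ¬ (num - 7 ≤ 0)), if_neg (by omega : ¬ (num + 7 ≥ 99))]
  rw [show max 1 (num - 7) = num - 7 by omega, show min 98 (num + 7) = num + 7 by omega]
  rw [PySem.List.pyRange_one, PySem.List.pyRange_one]
  rw [show ((8 : Int) - (-7)).toNat = 15 by decide,
      show (num + 7 + 1 - (num - 7)).toNat = 15 by omega]
  simp only [List.nil_append, List.append_nil, List.map_map, Function.comp_def]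
  refine List.map_congr_left (fun k _ => by omega)

-- ===== VERDICT (by name: the statement is the Claim_ definition above) =====
theorem uncap_py_spec : Claim_equal_uncap_py := by
  intro num _
  unfold Spec_uncap_py
  by_cases h : num ≤ -8
  · exact uncap_low num h
  by_cases h2 : num ≤ 7
  · have hl : -7 ≤ num := by omega
    interval_cases num <;> decide
  by_cases h3 : num ≤ 91
  · exact uncap_mid num (by omega) h3
  by_cases h4 : num ≤ 106
  · have hl : 92 ≤ num := by omega
    interval_cases num <;> decide
  · exact uncap_high num (by omega)
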